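-- pv_equiv track=rewrite | github.com/eliottcassidy2000/math | 04-computation/cutflip_delta_deep.py | cut_flip
-- ===== SOURCE A (Python) =====
-- def cut_flip(T, S):
--     """Apply cut-flip phi_S: reverse all arcs between S and V\\S."""
--     n = len(T)
--     T_new = [row[:] for row in T]
--     for i in range(n):
--         for j in range(n):
--             if i == j:
--                 continue
--             if (i in S) != (j in S):
--                 T_new[i][j] = 1 - T[i][j]
--     return T_new
-- ===== SOURCE B (Python) =====
-- def cut_flip(T, S):
--     """Apply cut-flip phi_S: reverse all arcs between S and V\\S.
--
--     Row/column complement method: for each cut vertex s, complement the whole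
--     row s and whole column s.  An entry with exactly one endpoint in S is
--     complemented an odd number of times (net flip); an entry with both or
--     neither endpoint in S (including the diagonal) is complemented an even
--     number of times, and 1-(1-x) = x restores it.
--     """
--     n = len(T)
--     T_new = [row[:] for row in T]
--     for s in S:
--         if 0 <= s < n:
--             for j in range(n):
--                 T_new[s][j] = 1 - T_new[s][j]
--                 T_new[j][s] = 1 - T_new[j][s]
--     return T_new
-- ===== Notes on version B (the rewrite author's own statement) =====
-- stated objective: alternative
-- what changed: B replaces A's scan of all n^2 ordered pairs with the per-pair XOR membership test by a row/column complement sweep: for each cut vertex s it complements the entire row s and entire column s, and cancellation of double complements (1-(1-x)=x) leaves exactly the cut entries flipped.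
-- outside the precondition, e.g. on cut_flip([[0, 1], [1]], {1}): A returns [[0, 0], [0]], B raises IndexError
import Mathlib
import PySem

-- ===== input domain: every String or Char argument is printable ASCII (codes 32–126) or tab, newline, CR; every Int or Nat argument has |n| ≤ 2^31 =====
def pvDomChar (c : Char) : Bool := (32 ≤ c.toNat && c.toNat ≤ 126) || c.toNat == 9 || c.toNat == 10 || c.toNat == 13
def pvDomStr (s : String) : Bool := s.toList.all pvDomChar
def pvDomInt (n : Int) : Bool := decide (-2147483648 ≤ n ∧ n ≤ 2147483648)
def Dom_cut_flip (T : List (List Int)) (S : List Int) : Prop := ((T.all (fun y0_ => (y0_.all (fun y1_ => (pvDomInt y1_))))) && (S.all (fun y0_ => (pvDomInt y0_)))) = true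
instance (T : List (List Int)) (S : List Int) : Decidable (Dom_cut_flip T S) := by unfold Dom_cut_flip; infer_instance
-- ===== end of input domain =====

-- B flips the cut by complementing, for each cut vertex s, the whole row s and whole column s,
-- letting double complements cancel (1-(1-x)=x) — instead of A's scan of all n^2 ordered pairs
-- with a per-pair XOR membership test (alternative algorithm, same asymptotic cost).

-- shared subscript helpers: pvEntry a p q = a[p][q] (read, 0/[] default), pvSetE a i j v = "a[i][j] = v"
def pvEntry (a : List (List Int)) (p q : Nat) : Int := (a.getD p []).getD q 0
def pvSetE (a : List (List Int)) (i j : Nat) (v : Int) : List (List Int) :=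
  a.set i ((a.getD i []).set j v)

-- ===== PORT A =====
def cut_flip (T : List (List Int)) (S : List Int) : List (List Int) :=
  let n := T.length
  let Tnew := T.map (fun row => row)   -- row[:]
  (List.range n).foldl (fun acc i =>
    (List.range n).foldl (fun acc2 j =>
      if i = j then acc2
      else if decide (Int.ofNat i ∈ S) ≠ decide (Int.ofNat j ∈ S) then
        pvSetE acc2 i j (1 - pvEntry T i j)
      else acc2) acc) Tnew

-- ===== PORT B =====
def cut_flip_alt (T : List (List Int)) (S : List Int) : List (List Int) :=
  let n := T.length
  let Tnew := T.map (fun row => row)   -- row[:]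
  S.foldl (fun acc s =>
    if 0 ≤ s ∧ s < (n : Int) then
      (List.range n).foldl (fun acc2 j =>
        let a1 := pvSetE acc2 s.toNat j (1 - pvEntry acc2 s.toNat j)
        pvSetE a1 j s.toNat (1 - pvEntry a1 j s.toNat)) acc
    else acc) Tnew

-- ===== PRECONDITION & SPEC =====
-- Pre_ excludes (a) inputs where a Python program raises IndexError: for each cut vertex i the
-- full row i must have length ≥ n and every row must reach column i (B sweeps the whole row and
-- column, so on some ragged T it raises where A still returns — a ragged adjacency matrix is
-- outside the task's natural domain), and (b) list encodings of the set argument S carrying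
-- duplicates (S is a Python set by type; a duplicated encoding makes B's double toggle cancel).
def Pre_cut_flip (T : List (List Int)) (S : List Int) : Prop :=
  S.Nodup ∧ ∀ i ∈ List.range T.length, (↑i : Int) ∈ S →
    T.length ≤ (T.getD i []).length ∧ ∀ j ∈ List.range T.length, i < (T.getD j []).length
instance (T : List (List Int)) (S : List Int) : Decidable (Pre_cut_flip T S) := by
  unfold Pre_cut_flip; infer_instance

def pvWitness_cut_flip : List (List Int) × List Int := ([[0, 1], [1, 0]], [0])

def Spec_cut_flip (T : List (List Int)) (S : List Int) (out : List (List Int)) : Prop := out = cut_flip_alt T S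
instance (T : List (List Int)) (S : List Int) (out : List (List Int)) : Decidable (Spec_cut_flip T S out) := by unfold Spec_cut_flip; infer_instance

-- ===== CLAIM (what is proved, stated in full; the proofs are below) =====
def Claim_equal_cut_flip : Prop := ∀ (T : List (List Int)) (S : List Int), Dom_cut_flip T S → Pre_cut_flip T S → Spec_cut_flip T S (cut_flip T S)

-- ===== LEMMAS AND PROOFS =====

-- A's write step at a pair of indices, value read from the original T
def pvStep (T : List (List Int)) (acc : List (List Int)) (pq : Nat × Nat) : List (List Int) :=
  pvSetE acc pq.1 pq.2 (1 - pvEntry T pq.1 pq.2)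

-- B's toggle step: complement the current entry in place
def pvTog (acc : List (List Int)) (pq : Nat × Nat) : List (List Int) :=
  pvSetE acc pq.1 pq.2 (1 - pvEntry acc pq.1 pq.2)

def pvCond (S : List Int) (pq : Nat × Nat) : Bool :=
  !(pq.1 == pq.2) && (decide (Int.ofNat pq.1 ∈ S) != decide (Int.ofNat pq.2 ∈ S))

-- A's ordered write-list
def pvLA (T : List (List Int)) (S : List Int) : List (Nat × Nat) :=
  (List.range T.length).flatMap
    (fun i => ((List.range T.length).map (fun j => (i, j))).filter (pvCond S))

-- B's toggle list for one cut vertex t, and the whole toggle list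
def pvLs (n t : Nat) : List (Nat × Nat) :=
  (List.range n).flatMap (fun j => [(t, j), (j, t)])

def pvLB (T : List (List Int)) (S : List Int) : List (Nat × Nat) :=
  (S.filter (fun s => decide (0 ≤ s ∧ s < (T.length : Int)))).flatMap
    (fun s => pvLs T.length s.toNat)

lemma foldl_nest {α β γ : Type} (f : β → α → β) (g : γ → List α) (L : List γ) (b : β) :
    L.foldl (fun acc c => (g c).foldl f acc) b = (L.flatMap g).foldl f b := by
  induction L generalizing b with
  | nil => simp
  | cons c L ih => simp [List.foldl_append, ih]

lemma foldl_if {α β : Type} (f : β → α → β) (p : α → Bool) (L : List α) (b : β) :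
    L.foldl (fun acc x => if p x then f acc x else acc) b = (L.filter p).foldl f b := by
  induction L generalizing b with
  | nil => simp
  | cons x L ih => by_cases h : p x <;> simp [h, ih]

lemma length_setE (a : List (List Int)) (i j : Nat) (v : Int) :
    (pvSetE a i j v).length = a.length := by simp [pvSetE]

lemma getD_setE (a : List (List Int)) (i j p : Nat) (v : Int) :
    (pvSetE a i j v).getD p [] =
      if p = i ∧ i < a.length then (a.getD i []).set j v else a.getD p [] := by
  unfold pvSetE
  by_cases hi : i < a.length
  · by_cases hp : p = i
    · subst hp
      simp [List.getD_eq_getElem?_getD, hi]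
    · simp [List.getD_eq_getElem?_getD, hp, Ne.symm hp]
  · rw [List.set_eq_of_length_le (by omega)]
    simp [hi]

lemma getD_set_int (l : List Int) (j q : Nat) (v : Int) :
    (l.set j v).getD q 0 = if q = j ∧ j < l.length then v else l.getD q 0 := by
  by_cases hq : q = j
  · subst hq
    by_cases hj : q < l.length <;>
      simp [List.getD_eq_getElem?_getD, hj]
  · simp [List.getD_eq_getElem?_getD, hq, Ne.symm hq]

lemma rowlen_setE (a : List (List Int)) (i j p : Nat) (v : Int) :
    ((pvSetE a i j v).getD p []).length = (a.getD p []).length := by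
  rw [getD_setE]; split_ifs with h
  · rcases h with ⟨h1, _⟩; subst h1; simp
  · rfl

lemma entry_setE (a : List (List Int)) (i j p q : Nat) (v : Int) :
    pvEntry (pvSetE a i j v) p q =
      if p = i ∧ q = j ∧ i < a.length ∧ j < (a.getD i []).length then v
      else pvEntry a p q := by
  unfold pvEntry
  rw [getD_setE]
  by_cases hpi : p = i ∧ i < a.length
  · rcases hpi with ⟨h1, h2⟩; subst h1
    rw [if_pos ⟨rfl, h2⟩, getD_set_int]
    split_ifs <;> tauto
  · rw [if_neg hpi]
    split_ifs with h
    · exact absurd ⟨h.1, h.2.2.1⟩ hpi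
    · rfl

-- --- A as a fold of pvStep over pvLA, and A's entry formula (membership) ---

lemma length_fold (T : List (List Int)) (L : List (Nat × Nat)) (a : List (List Int)) :
    (L.foldl (pvStep T) a).length = a.length := by
  induction L generalizing a with
  | nil => rfl
  | cons pq L ih => rw [List.foldl_cons, ih, pvStep, length_setE]

lemma rowlen_fold (T : List (List Int)) (L : List (Nat × Nat)) (a : List (List Int)) (p : Nat) :
    ((L.foldl (pvStep T) a).getD p []).length = (a.getD p []).length := by
  induction L generalizing a with
  | nil => rfl
  | cons pq L ih => rw [List.foldl_cons, ih, pvStep, rowlen_setE]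

lemma entry_fold (T : List (List Int)) (L : List (Nat × Nat)) (a : List (List Int)) (p q : Nat) :
    pvEntry (L.foldl (pvStep T) a) p q =
      if (p, q) ∈ L ∧ p < a.length ∧ q < (a.getD p []).length then 1 - pvEntry T p q
      else pvEntry a p q := by
  induction L generalizing a with
  | nil => simp
  | cons pq L ih =>
    rcases pq with ⟨x, y⟩
    rw [List.foldl_cons, ih, pvStep]
    rw [length_setE, rowlen_setE, entry_setE]
    simp only [List.mem_cons, Prod.mk.injEq]
    by_cases hm : (p, q) ∈ L
    · simp only [hm, or_true, true_and]
      split_ifs with h1 h2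
      · rfl
      · exfalso; obtain ⟨hx, hy, h3, h4⟩ := h2; subst hx; subst hy; exact h1 ⟨h3, h4⟩
      · rfl
    · simp only [hm, or_false]
      by_cases hpq : p = x ∧ q = y
      · rcases hpq with ⟨h1, h2⟩; subst h1; subst h2
        simp only [and_self, true_and, false_and]
        split_ifs <;> tauto
      · have : ¬((p = x ∧ q = y) ∧ p < a.length ∧ q < (a.getD p []).length) := by tauto
        rw [if_neg (by tauto), if_neg (by tauto), if_neg (by tauto)]

lemma A_as_fold (T : List (List Int)) (S : List Int) :
    cut_flip T S = (pvLA T S).foldl (pvStep T) T := by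
  unfold cut_flip pvLA
  simp only [List.map_id']
  have hfun : (fun (acc : List (List Int)) (i : Nat) =>
      (List.range T.length).foldl (fun acc2 j =>
        if i = j then acc2
        else if decide (Int.ofNat i ∈ S) ≠ decide (Int.ofNat j ∈ S) then
          pvSetE acc2 i j (1 - pvEntry T i j)
        else acc2) acc)
      = fun acc i =>
        (((List.range T.length).map (fun j => (i, j))).filter (pvCond S)).foldl (pvStep T) acc := by
    funext acc i
    rw [← foldl_if, List.foldl_map]
    congr 1
    funext acc2 j
    by_cases h1 : i = j
    · simp [pvCond, h1]
    · by_cases h2 : decide (Int.ofNat i ∈ S) = decide (Int.ofNat j ∈ S) <;>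
        simp [pvCond, pvStep, h1]
  rw [hfun, foldl_nest]

lemma mem_pvLA (T : List (List Int)) (S : List Int) (p q : Nat) :
    (p, q) ∈ pvLA T S ↔ p < T.length ∧ q < T.length ∧ pvCond S (p, q) = true := by
  simp only [pvLA, List.mem_flatMap, List.mem_filter, List.mem_map, List.mem_range]
  constructor
  · rintro ⟨i, hi, ⟨j, hj, hij⟩, hc⟩
    cases hij; exact ⟨hi, hj, hc⟩
  · rintro ⟨hp, hq, hc⟩
    exact ⟨p, hp, ⟨⟨q, hq, rfl⟩, hc⟩⟩

-- --- B as a fold of pvTog over pvLB, and B's entry formula (count parity) ---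

lemma length_togfold (L : List (Nat × Nat)) (a : List (List Int)) :
    (L.foldl pvTog a).length = a.length := by
  induction L generalizing a with
  | nil => rfl
  | cons pq L ih => rw [List.foldl_cons, ih, pvTog, length_setE]

lemma rowlen_togfold (L : List (Nat × Nat)) (a : List (List Int)) (p : Nat) :
    ((L.foldl pvTog a).getD p []).length = (a.getD p []).length := by
  induction L generalizing a with
  | nil => rfl
  | cons pq L ih => rw [List.foldl_cons, ih, pvTog, rowlen_setE]

lemma entry_togfold (L : List (Nat × Nat)) (a : List (List Int)) (p q : Nat) :
    pvEntry (L.foldl pvTog a) p q =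
      if L.count (p, q) % 2 = 1 ∧ p < a.length ∧ q < (a.getD p []).length
      then 1 - pvEntry a p q else pvEntry a p q := by
  induction L generalizing a with
  | nil => simp
  | cons pq L ih =>
    rcases pq with ⟨x, y⟩
    rw [List.foldl_cons, ih]
    have hlen : (pvTog a (x, y)).length = a.length := length_setE ..
    have hrow : ((pvTog a (x, y)).getD p []).length = (a.getD p []).length := rowlen_setE ..
    have hent : pvEntry (pvTog a (x, y)) p q =
        if p = x ∧ q = y ∧ x < a.length ∧ y < (a.getD x []).length
        then 1 - pvEntry a x y else pvEntry a p q := entry_setE ..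
    rw [hlen, hrow, hent, List.count_cons]
    by_cases hpq : p = x ∧ q = y
    · obtain ⟨rfl, rfl⟩ := hpq
      rw [show (if ((p, q) == (p, q)) = true then 1 else 0) = 1 from by simp]
      by_cases hr : p < a.length ∧ q < (a.getD p []).length
      · rw [if_pos (show p = p ∧ q = q ∧ p < a.length ∧ q < (a.getD p []).length from
          ⟨rfl, rfl, hr.1, hr.2⟩)]
        by_cases hc : List.count (p, q) L % 2 = 1
        · rw [if_pos ⟨hc, hr⟩,
            if_neg (show ¬((List.count (p, q) L + 1) % 2 = 1 ∧ p < a.length ∧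
              q < (a.getD p []).length) from fun h => absurd h.1 (by omega))]
          ring
        · rw [if_neg (show ¬(List.count (p, q) L % 2 = 1 ∧ p < a.length ∧
              q < (a.getD p []).length) from fun h => hc h.1),
            if_pos (show (List.count (p, q) L + 1) % 2 = 1 ∧ p < a.length ∧
              q < (a.getD p []).length from ⟨by omega, hr⟩)]
      · rw [if_neg (show ¬(p = p ∧ q = q ∧ p < a.length ∧ q < (a.getD p []).length) from
            fun h => hr h.2.2),
          if_neg (show ¬(List.count (p, q) L % 2 = 1 ∧ p < a.length ∧
            q < (a.getD p []).length) from fun h => hr h.2),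
          if_neg (show ¬((List.count (p, q) L + 1) % 2 = 1 ∧ p < a.length ∧
            q < (a.getD p []).length) from fun h => hr h.2)]
    · have hb : ((x, y) == (p, q)) = false := by
        simp only [beq_eq_false_iff_ne, ne_eq, Prod.mk.injEq]
        tauto
      rw [hb]
      simp only [Bool.false_eq_true, if_false, Nat.add_zero]
      rw [if_neg (show ¬(p = x ∧ q = y ∧ x < a.length ∧ y < (a.getD x []).length) from
        fun h => hpq ⟨h.1, h.2.1⟩)]

lemma foldl_if' {α β : Type} (f : β → α → β) (p : α → Prop) [DecidablePred p]
    (L : List α) (b : β) :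
    L.foldl (fun acc x => if p x then f acc x else acc) b
      = (L.filter (fun x => decide (p x))).foldl f b := by
  induction L generalizing b with
  | nil => simp
  | cons x L ih => by_cases h : p x <;> simp [h, ih]

lemma B_as_fold (T : List (List Int)) (S : List Int) :
    cut_flip_alt T S = (pvLB T S).foldl pvTog T := by
  unfold cut_flip_alt pvLB
  simp only [List.map_id']
  have hinner : ∀ (s : Int) (acc : List (List Int)),
      (List.range T.length).foldl (fun acc2 j =>
        let a1 := pvSetE acc2 s.toNat j (1 - pvEntry acc2 s.toNat j)
        pvSetE a1 j s.toNat (1 - pvEntry a1 j s.toNat)) acc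
      = (pvLs T.length s.toNat).foldl pvTog acc := by
    intro s acc
    unfold pvLs
    rw [← foldl_nest]
    rfl
  have hfun : (fun (acc : List (List Int)) (s : Int) =>
      if 0 ≤ s ∧ s < (T.length : Int) then
        (List.range T.length).foldl (fun acc2 j =>
          let a1 := pvSetE acc2 s.toNat j (1 - pvEntry acc2 s.toNat j)
          pvSetE a1 j s.toNat (1 - pvEntry a1 j s.toNat)) acc
      else acc)
      = fun acc s =>
        if 0 ≤ s ∧ s < (T.length : Int) then (pvLs T.length s.toNat).foldl pvTog acc else acc := by
    funext acc s
    by_cases h : 0 ≤ s ∧ s < (T.length : Int) <;> simp [h, hinner]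
  rw [hfun, foldl_if' (fun acc (s : Int) => (pvLs T.length s.toNat).foldl pvTog acc)
        (fun s => 0 ≤ s ∧ s < (T.length : Int)), foldl_nest]

lemma count_pvLs (n t p q : Nat) :
    (pvLs n t).count (p, q)
      = (if t = p ∧ q < n then 1 else 0) + (if t = q ∧ p < n then 1 else 0) := by
  induction n with
  | zero => simp [pvLs]
  | succ n ih =>
    have : pvLs (n + 1) t = pvLs n t ++ [(t, n), (n, t)] := by
      unfold pvLs
      rw [List.range_succ, List.flatMap_append]
      rfl
    rw [this, List.count_append, ih]
    have hc : List.count (p, q) [(t, n), (n, t)]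
        = (if t = p ∧ q = n then 1 else 0) + (if n = p ∧ t = q then 1 else 0) := by
      simp only [List.count_cons, List.count_nil, beq_iff_eq, Prod.mk.injEq]
      split_ifs <;> omega
    rw [hc]
    split_ifs <;> omega

lemma count_parity (n : Nat) (D : List Int) (hnd : D.Nodup)
    (hD : ∀ s ∈ D, 0 ≤ s ∧ s < (n : Int)) (p q : Nat) (hp : p < n) (hq : q < n) :
    (D.flatMap (fun s => pvLs n s.toNat)).count (p, q) % 2
      = if decide ((p : Int) ∈ D) ≠ decide ((q : Int) ∈ D) then 1 else 0 := by
  induction D with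
  | nil => simp
  | cons s D ih =>
    have hs := hD s (List.mem_cons_self ..)
    have hsD : s ∉ D := (List.nodup_cons.mp hnd).1
    have hnd' := (List.nodup_cons.mp hnd).2
    have hD' : ∀ x ∈ D, 0 ≤ x ∧ x < (n : Int) := fun x hx => hD x (List.mem_cons_of_mem _ hx)
    have IH := ih hnd' hD'
    rw [List.flatMap_cons, List.count_append, count_pvLs]
    simp only [hp, hq, and_true]
    have e1 : (s.toNat = p) ↔ (s = (p : Int)) := by omega
    have e2 : (s.toNat = q) ↔ (s = (q : Int)) := by omega
    have mp : decide ((↑p : Int) ∈ s :: D)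
        = (decide (s = (↑p : Int)) || decide ((↑p : Int) ∈ D)) := by
      simp [List.mem_cons, eq_comm]
    have mq : decide ((↑q : Int) ∈ s :: D)
        = (decide (s = (↑q : Int)) || decide ((↑q : Int) ∈ D)) := by
      simp [List.mem_cons, eq_comm]
    rw [mp, mq]
    by_cases hsp : s = (p : Int) <;> by_cases hsq : s = (q : Int)
    · -- s = p and s = q, hence p = q
      have hpq : p = q := by omega
      subst hpq
      rw [if_pos (e1.mpr hsp), decide_eq_true hsp]
      simp only [Bool.true_or, ne_eq, not_true_eq_false, if_false]
      simp at IH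
      omega
    · -- s = p, s ≠ q; then p ∉ D
      have hpD : (↑p : Int) ∉ D := fun h => hsD (by rwa [hsp])
      rw [if_pos (e1.mpr hsp), if_neg (fun h => hsq (e2.mp h)),
        decide_eq_true hsp, decide_eq_false hsq, decide_eq_false hpD]
      rw [decide_eq_false hpD] at IH
      cases hbq : decide ((↑q : Int) ∈ D) <;> rw [hbq] at IH <;> simp at IH ⊢ <;> omega
    · -- s = q, s ≠ p; then q ∉ D
      have hqD : (↑q : Int) ∉ D := fun h => hsD (by rwa [hsq])
      rw [if_neg (fun h => hsp (e1.mp h)), if_pos (e2.mpr hsq),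
        decide_eq_false hsp, decide_eq_true hsq, decide_eq_false hqD]
      rw [decide_eq_false hqD] at IH
      cases hbp : decide ((↑p : Int) ∈ D) <;> rw [hbp] at IH <;> simp at IH ⊢ <;> omega
    · -- s matches neither
      rw [if_neg (fun h => hsp (e1.mp h)), if_neg (fun h => hsq (e2.mp h)),
        decide_eq_false hsp, decide_eq_false hsq]
      simp only [Bool.false_or, Nat.zero_add]
      exact IH

lemma mem_filter_range (S : List Int) (n p : Nat) (hp : p < n) :
    ((p : Int) ∈ S.filter (fun s => decide (0 ≤ s ∧ s < (n : Int)))) ↔ (p : Int) ∈ S := by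
  rw [List.mem_filter]
  constructor
  · exact fun h => h.1
  · intro h
    refine ⟨h, ?_⟩
    simp only [decide_eq_true_eq]
    omega

lemma getElem_eq_getD_outer (l : List (List Int)) (p : Nat) (h : p < l.length) :
    l[p] = l.getD p [] := by
  simp [List.getD_eq_getElem?_getD, List.getElem?_eq_getElem h]

lemma entry_eq_getElem (l : List (List Int)) (p q : Nat) (h1 : p < l.length)
    (h2 : q < (l[p]'h1).length) : pvEntry l p q = (l[p]'h1)[q]'h2 := by
  simp [pvEntry, List.getD_eq_getElem?_getD, h1, h2]

lemma count_pvLB_zero (T : List (List Int)) (S : List Int) (p q : Nat)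
    (hq : ¬ q < T.length) : (pvLB T S).count (p, q) = 0 := by
  unfold pvLB
  have h : ∀ D : List Int, (∀ s ∈ D, 0 ≤ s ∧ s < (T.length : Int)) →
      (D.flatMap (fun s => pvLs T.length s.toNat)).count (p, q) = 0 := by
    intro D hD
    induction D with
    | nil => simp
    | cons s D ih =>
      have hs := hD s (List.mem_cons_self ..)
      rw [List.flatMap_cons, List.count_append, count_pvLs,
        ih (fun x hx => hD x (List.mem_cons_of_mem _ hx))]
      rw [if_neg (show ¬(s.toNat = p ∧ q < T.length) from fun h => hq h.2),
        if_neg (show ¬(s.toNat = q ∧ p < T.length) from fun h => absurd h.1 (by omega))]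
  apply h
  intro s hs'
  have := (List.mem_filter.mp hs').2
  simpa using this

lemma cut_flip_eq_alt (T : List (List Int)) (S : List Int) (hnd : S.Nodup) :
    cut_flip T S = cut_flip_alt T S := by
  rw [A_as_fold, B_as_fold]
  apply List.ext_getElem
  · rw [length_fold, length_togfold]
  · intro p h1 h2
    apply List.ext_getElem
    · rw [getElem_eq_getD_outer _ _ h1, getElem_eq_getD_outer _ _ h2,
        rowlen_fold, rowlen_togfold]
    · intro q hq1 hq2
      rw [← entry_eq_getElem _ p q h1 hq1, ← entry_eq_getElem _ p q h2 hq2]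
      rw [entry_fold, entry_togfold]
      have hpT : p < T.length := by rw [length_fold] at h1; exact h1
      by_cases hqT : q < T.length
      case neg =>
        have hz := count_pvLB_zero T S p q hqT
        have hA : ¬ (p, q) ∈ pvLA T S := fun h => hqT ((mem_pvLA T S p q).mp h).2.1
        rw [if_neg (fun h => hA h.1),
          if_neg (show ¬((pvLB T S).count (p, q) % 2 = 1 ∧ p < T.length ∧
            q < (T.getD p []).length) from fun h => absurd (hz ▸ h.1) (by decide))]
      have hDnd : (S.filter (fun s => decide (0 ≤ s ∧ s < (T.length : Int)))).Nodup :=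
        hnd.filter _
      have hDrange : ∀ s ∈ S.filter (fun s => decide (0 ≤ s ∧ s < (T.length : Int))),
          0 ≤ s ∧ s < (T.length : Int) := by
        intro s hs
        have := (List.mem_filter.mp hs).2
        simpa using this
      have hparity := count_parity T.length _ hDnd hDrange p q hpT hqT
      have hmem := mem_pvLA T S p q
      -- both guards reduce to the same condition
      have dp : decide ((↑p : Int) ∈ S.filter (fun s => decide (0 ≤ s ∧ s < (T.length : Int))))
          = decide ((↑p : Int) ∈ S) := decide_eq_decide.mpr (mem_filter_range S T.length p hpT)
      have dq : decide ((↑q : Int) ∈ S.filter (fun s => decide (0 ≤ s ∧ s < (T.length : Int))))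
          = decide ((↑q : Int) ∈ S) := decide_eq_decide.mpr (mem_filter_range S T.length q hqT)
      have hcond : ((p, q) ∈ pvLA T S) ↔ ((pvLB T S).count (p, q) % 2 = 1) := by
        rw [hmem]
        unfold pvLB
        rw [hparity, dp, dq]
        constructor
        · rintro ⟨_, _, hc⟩
          simp only [pvCond, Bool.and_eq_true, bne_iff_ne, Bool.not_eq_eq_eq_not,
            Bool.not_true, beq_eq_false_iff_ne, ne_eq] at hc
          rw [if_pos (by simpa [Int.ofNat_inj] using hc.2)]
        · intro h
          by_cases hpq : decide ((p : Int) ∈ S) ≠ decide ((q : Int) ∈ S)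
          · refine ⟨hpT, hqT, ?_⟩
            have hne : p ≠ q := by
              intro h'; subst h'; exact hpq rfl
            simp [pvCond, hne]
            simpa [Int.ofNat] using hpq
          · rw [if_neg hpq] at h; omega
      split_ifs with hA hB hB
      · rfl
      · exact absurd ⟨hcond.mp hA.1, hA.2⟩ hB
      · exact absurd ⟨hcond.mpr hB.1, hB.2⟩ hA
      · rfl

-- ===== VERDICT (by name: the statement is the Claim_ definition above) =====
theorem cut_flip_spec : Claim_equal_cut_flip := by
  intro T S _ hpre
  unfold Spec_cut_flip
  exact cut_flip_eq_alt T S hpre.1
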